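-- pv_equiv track=rewrite | github.com/Idotopaz/Afeka-python | Home Work/Task 6/min_digits_number.py | new_number_from_min_digits
-- ===== SOURCE A (Python) =====
-- def new_number_from_min_digits(num1, num2):
--     counter1=0
--     temp_num1=num1
--     temp_num2=num2
--     while temp_num1>0:
--         counter1+=1
--         temp_num1//=10
--     counter2=0
--     while temp_num2>0:
--         counter2+=1
--         temp_num2//=10
--     if counter1 != counter2:
--         return -1
--     else:
--         total=0
--         pose=1
--         while num1>0:
--             if num1%10<num2%10:
--                 total+=(num1%10)*pose
--             else:
--                 total +=  (num2 % 10) * pose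
--             pose *= 10
--             num1//=10
--             num2//=10
--         return total
-- ===== SOURCE B (Python) =====
-- def new_number_from_min_digits(num1, num2):
--     if num1 <= 0 and num2 <= 0:
--         return 0
--     if num1 <= 0 or num2 <= 0:
--         return -1
--     rest = new_number_from_min_digits(num1 // 10, num2 // 10)
--     if rest == -1:
--         return -1
--     return rest * 10 + min(num1 % 10, num2 % 10)
-- ===== Notes on version B (the rewrite author's own statement) =====
-- stated objective: simpler
-- what changed: Replaces A's two separate digit-counting loops plus a positional-accumulator (pose) loop with a single fused top-down recursion that divides both numbers by 10 together, builds the result most-significant-digit-first as rest*10+min(digit,digit), and propagates -1 on a length mismatch.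
import Mathlib
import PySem

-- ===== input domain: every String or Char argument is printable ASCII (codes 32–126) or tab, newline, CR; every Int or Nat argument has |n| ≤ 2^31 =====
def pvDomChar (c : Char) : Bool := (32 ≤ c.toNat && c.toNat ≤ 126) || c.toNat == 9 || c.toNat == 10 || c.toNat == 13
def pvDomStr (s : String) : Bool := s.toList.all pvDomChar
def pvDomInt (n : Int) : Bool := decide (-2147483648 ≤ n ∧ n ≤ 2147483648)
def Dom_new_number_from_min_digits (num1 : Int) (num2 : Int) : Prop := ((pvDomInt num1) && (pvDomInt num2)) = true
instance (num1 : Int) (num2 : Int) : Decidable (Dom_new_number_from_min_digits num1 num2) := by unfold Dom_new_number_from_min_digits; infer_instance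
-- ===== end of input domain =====

-- B replaces A's two counting passes + positional-accumulator loop by one fused top-down
-- recursion (MSB-first build, -1 propagated on length mismatch); objective: simpler.

-- ===== PORT A =====
-- while temp>0: counter+=1; temp//=10
def pvCountLoop (counter : Int) (temp : Int) : Int :=
  if 0 < temp then pvCountLoop (counter + 1) (PySem.Int.floordiv temp 10) else counter
termination_by temp.toNat
decreasing_by
  rw [PySem.Int.floordiv_eq_ediv_of_pos (by norm_num)]
  omega

-- while num1>0: total += min-digit * pose; pose*=10; num1//=10; num2//=10
def pvMainLoop (total : Int) (pose : Int) (num1 : Int) (num2 : Int) : Int :=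
  if 0 < num1 then
    pvMainLoop
      (if PySem.Int.mod num1 10 < PySem.Int.mod num2 10 then
        total + PySem.Int.mod num1 10 * pose
      else
        total + PySem.Int.mod num2 10 * pose)
      (pose * 10)
      (PySem.Int.floordiv num1 10)
      (PySem.Int.floordiv num2 10)
  else total
termination_by num1.toNat
decreasing_by
  rw [PySem.Int.floordiv_eq_ediv_of_pos (by norm_num)]
  omega

def new_number_from_min_digits (num1 : Int) (num2 : Int) : Int :=
  if pvCountLoop 0 num1 ≠ pvCountLoop 0 num2 then -1
  else pvMainLoop 0 1 num1 num2

-- ===== PORT B =====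
def new_number_from_min_digits_alt (num1 : Int) (num2 : Int) : Int :=
  if num1 ≤ 0 ∧ num2 ≤ 0 then 0
  else if num1 ≤ 0 ∨ num2 ≤ 0 then -1
  else
    let rest := new_number_from_min_digits_alt (PySem.Int.floordiv num1 10) (PySem.Int.floordiv num2 10)
    if rest = -1 then -1
    else rest * 10 + min (PySem.Int.mod num1 10) (PySem.Int.mod num2 10)
termination_by num1.toNat
decreasing_by
  rw [PySem.Int.floordiv_eq_ediv_of_pos (by norm_num)]
  omega

-- ===== PRECONDITION & SPEC =====
def Spec_new_number_from_min_digits (num1 : Int) (num2 : Int) (out : Int) : Prop := out = new_number_from_min_digits_alt num1 num2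
instance (num1 : Int) (num2 : Int) (out : Int) : Decidable (Spec_new_number_from_min_digits num1 num2 out) := by unfold Spec_new_number_from_min_digits; infer_instance

-- ===== CLAIM (what is proved, stated in full; the proofs are below) =====
def Claim_equal_new_number_from_min_digits : Prop := ∀ (num1 : Int) (num2 : Int), Dom_new_number_from_min_digits num1 num2 → Spec_new_number_from_min_digits num1 num2 (new_number_from_min_digits num1 num2)

-- ===== LEMMAS AND PROOFS =====

theorem pvCountLoop_nonpos {n : Int} (h : n ≤ 0) : pvCountLoop 0 n = 0 := by
  rw [pvCountLoop]
  simp [not_lt.mpr h]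

theorem pvCountLoop_shift_aux (k : Nat) :
    ∀ n : Int, n.toNat ≤ k → ∀ c : Int, pvCountLoop c n = c + pvCountLoop 0 n := by
  induction k with
  | zero =>
    intro n hn c
    have hle : n ≤ 0 := by omega
    rw [pvCountLoop_nonpos hle, pvCountLoop]
    simp [not_lt.mpr hle]
  | succ k ih =>
    intro n hn c
    by_cases h : 0 < n
    · have hd : (PySem.Int.floordiv n 10).toNat ≤ k := by
        rw [PySem.Int.floordiv_eq_ediv_of_pos (by norm_num)]
        omega
      rw [pvCountLoop]
      conv_rhs => rw [pvCountLoop]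
      simp only [h, if_pos]
      rw [ih _ hd (c + 1), ih _ hd (0 + 1)]
      ring
    · have hle : n ≤ 0 := by omega
      rw [pvCountLoop_nonpos hle, pvCountLoop]
      simp [h]

theorem pvCountLoop_shift (n c : Int) : pvCountLoop c n = c + pvCountLoop 0 n :=
  pvCountLoop_shift_aux n.toNat n le_rfl c

theorem pvCountLoop_pos {n : Int} (h : 0 < n) :
    pvCountLoop 0 n = pvCountLoop 0 (PySem.Int.floordiv n 10) + 1 := by
  rw [pvCountLoop]
  simp only [h, if_pos]
  rw [pvCountLoop_shift]
  ring

theorem pvCountLoop_nonneg_aux (k : Nat) :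
    ∀ n : Int, n.toNat ≤ k → 0 ≤ pvCountLoop 0 n := by
  induction k with
  | zero =>
    intro n hn
    rw [pvCountLoop_nonpos (by omega)]
  | succ k ih =>
    intro n hn
    by_cases h : 0 < n
    · have hd : (PySem.Int.floordiv n 10).toNat ≤ k := by
        rw [PySem.Int.floordiv_eq_ediv_of_pos (by norm_num)]
        omega
      rw [pvCountLoop_pos h]
      have := ih _ hd
      omega
    · rw [pvCountLoop_nonpos (by omega)]

theorem pvCountLoop_nonneg (n : Int) : 0 ≤ pvCountLoop 0 n :=
  pvCountLoop_nonneg_aux n.toNat n le_rfl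

theorem pvMainLoop_nonpos {n1 : Int} (h : ¬ 0 < n1) (n2 total pose : Int) :
    pvMainLoop total pose n1 n2 = total := by
  rw [pvMainLoop]
  simp [h]

theorem pvMainLoop_linear_aux (k : Nat) :
    ∀ n1 : Int, n1.toNat ≤ k → ∀ n2 total pose : Int,
      pvMainLoop total pose n1 n2 = total + pose * pvMainLoop 0 1 n1 n2 := by
  induction k with
  | zero =>
    intro n1 hn n2 total pose
    have h : ¬ 0 < n1 := by omega
    rw [pvMainLoop_nonpos h, pvMainLoop_nonpos h]
    ring
  | succ k ih =>
    intro n1 hn n2 total pose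
    by_cases h : 0 < n1
    · have hd : (PySem.Int.floordiv n1 10).toNat ≤ k := by
        rw [PySem.Int.floordiv_eq_ediv_of_pos (by norm_num)]
        omega
      rw [pvMainLoop]
      conv_rhs => rw [pvMainLoop]
      simp only [h, if_pos]
      split_ifs
      all_goals
        conv_rhs => rw [ih _ hd]
        rw [ih _ hd]
        ring
    · rw [pvMainLoop_nonpos h, pvMainLoop_nonpos h]
      ring

theorem pvMainLoop_linear (n1 n2 total pose : Int) :
    pvMainLoop total pose n1 n2 = total + pose * pvMainLoop 0 1 n1 n2 :=
  pvMainLoop_linear_aux n1.toNat n1 le_rfl n2 total pose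

theorem pvMainLoop_nonneg_aux (k : Nat) :
    ∀ n1 : Int, n1.toNat ≤ k → ∀ n2 : Int, 0 ≤ pvMainLoop 0 1 n1 n2 := by
  induction k with
  | zero =>
    intro n1 hn n2
    rw [pvMainLoop_nonpos (by omega)]
  | succ k ih =>
    intro n1 hn n2
    by_cases h : 0 < n1
    · have hd : (PySem.Int.floordiv n1 10).toNat ≤ k := by
        rw [PySem.Int.floordiv_eq_ediv_of_pos (by norm_num)]
        omega
      rw [pvMainLoop]
      simp only [h, if_pos]
      rw [pvMainLoop_linear]
      have hM := ih _ hd (PySem.Int.floordiv n2 10)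
      have hm1 : 0 ≤ PySem.Int.mod n1 10 := PySem.Int.mod_nonneg _ (by norm_num)
      have hm2 : 0 ≤ PySem.Int.mod n2 10 := PySem.Int.mod_nonneg _ (by norm_num)
      split_ifs <;> nlinarith
    · rw [pvMainLoop_nonpos h]

theorem pvMainLoop_nonneg (n1 n2 : Int) : 0 ≤ pvMainLoop 0 1 n1 n2 :=
  pvMainLoop_nonneg_aux n1.toNat n1 le_rfl n2

theorem pvAlt_pos {num1 num2 : Int} (h1 : 0 < num1) (h2 : 0 < num2) :
    new_number_from_min_digits_alt num1 num2 =
      (if new_number_from_min_digits_alt (PySem.Int.floordiv num1 10) (PySem.Int.floordiv num2 10) = -1 then -1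
       else new_number_from_min_digits_alt (PySem.Int.floordiv num1 10) (PySem.Int.floordiv num2 10) * 10
              + min (PySem.Int.mod num1 10) (PySem.Int.mod num2 10)) := by
  have ha : ¬ (num1 ≤ 0 ∧ num2 ≤ 0) := by omega
  have hb : ¬ (num1 ≤ 0 ∨ num2 ≤ 0) := by omega
  rw [new_number_from_min_digits_alt, if_neg ha, if_neg hb]

theorem pv_equiv_base {n1 : Int} (h1 : n1 ≤ 0) (n2 : Int) :
    new_number_from_min_digits n1 n2 = new_number_from_min_digits_alt n1 n2 := by
  rw [new_number_from_min_digits, new_number_from_min_digits_alt]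
  by_cases h2 : n2 ≤ 0
  · have hc : pvCountLoop 0 n1 = pvCountLoop 0 n2 := by
      rw [pvCountLoop_nonpos h1, pvCountLoop_nonpos h2]
    rw [pvMainLoop_nonpos (by omega)]
    simp [hc, h1, h2]
  · have hc1 : pvCountLoop 0 n1 = 0 := pvCountLoop_nonpos h1
    have hc2 : 0 < pvCountLoop 0 n2 := by
      rw [pvCountLoop_pos (by omega)]
      have := pvCountLoop_nonneg (PySem.Int.floordiv n2 10)
      omega
    have hne : pvCountLoop 0 n1 ≠ pvCountLoop 0 n2 := by omega
    simp [hne, h1, h2]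

theorem pv_equiv_aux (k : Nat) :
    ∀ n1 : Int, n1.toNat ≤ k → ∀ n2 : Int,
      new_number_from_min_digits n1 n2 = new_number_from_min_digits_alt n1 n2 := by
  induction k with
  | zero =>
    intro n1 hn n2
    exact pv_equiv_base (by omega) n2
  | succ k ih =>
    intro n1 hn n2
    by_cases h1 : n1 ≤ 0
    · exact pv_equiv_base h1 n2
    · rw [not_le] at h1
      by_cases h2 : n2 ≤ 0
      · have hc1 : 0 < pvCountLoop 0 n1 := by
          rw [pvCountLoop_pos h1]
          have := pvCountLoop_nonneg (PySem.Int.floordiv n1 10)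
          omega
        have hc2 : pvCountLoop 0 n2 = 0 := pvCountLoop_nonpos h2
        have hne : pvCountLoop 0 n1 ≠ pvCountLoop 0 n2 := by omega
        rw [new_number_from_min_digits, new_number_from_min_digits_alt]
        simp [hne, h2, not_le.mpr h1]
      · rw [not_le] at h2
        have hd : (PySem.Int.floordiv n1 10).toNat ≤ k := by
          rw [PySem.Int.floordiv_eq_ediv_of_pos (by norm_num)]
          omega
        have hIH := ih _ hd (PySem.Int.floordiv n2 10)
        rw [pvAlt_pos h1 h2, ← hIH]
        by_cases hc : pvCountLoop 0 (PySem.Int.floordiv n1 10) = pvCountLoop 0 (PySem.Int.floordiv n2 10)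
        · have hceq : pvCountLoop 0 n1 = pvCountLoop 0 n2 := by
            rw [pvCountLoop_pos h1, pvCountLoop_pos h2, hc]
          have hMnn := pvMainLoop_nonneg (PySem.Int.floordiv n1 10) (PySem.Int.floordiv n2 10)
          have hAsub : new_number_from_min_digits (PySem.Int.floordiv n1 10) (PySem.Int.floordiv n2 10)
              = pvMainLoop 0 1 (PySem.Int.floordiv n1 10) (PySem.Int.floordiv n2 10) := by
            rw [new_number_from_min_digits, if_neg (not_not_intro hc)]
          rw [hAsub, new_number_from_min_digits, if_neg (not_not_intro hceq)]
          rw [if_neg (show ¬ pvMainLoop 0 1 (PySem.Int.floordiv n1 10) (PySem.Int.floordiv n2 10) = -1 by omega)]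
          rw [pvMainLoop]
          simp only [h1, if_pos]
          rw [pvMainLoop_linear]
          split_ifs <;> omega
        · have hcne : pvCountLoop 0 n1 ≠ pvCountLoop 0 n2 := by
            rw [pvCountLoop_pos h1, pvCountLoop_pos h2]
            omega
          have hAsub : new_number_from_min_digits (PySem.Int.floordiv n1 10) (PySem.Int.floordiv n2 10) = -1 := by
            rw [new_number_from_min_digits, if_pos hc]
          rw [hAsub, new_number_from_min_digits, if_pos hcne]
          simp

theorem pv_equiv (n1 n2 : Int) :
    new_number_from_min_digits n1 n2 = new_number_from_min_digits_alt n1 n2 :=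
  pv_equiv_aux n1.toNat n1 le_rfl n2

-- ===== VERDICT (by name: the statement is the Claim_ definition above) =====
theorem new_number_from_min_digits_spec : Claim_equal_new_number_from_min_digits := by
  intro n1 n2 _
  exact pv_equiv n1 n2
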